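-- pv_equiv track=rewrite | github.com/stewvsshark/algorithms-practice | Greedy Algorithms/slow-slums.py | do_greedy
-- ===== SOURCE A (Python) =====
-- def do_greedy(arr, result):
--     if len(arr) == 1:
--         return 0
--     else:
--         arr.sort()
--         greedy_sum = arr[len(arr)-1] + arr[len(arr)-2]
--         new_arr = arr[:-2] + [greedy_sum]
--         return greedy_sum + do_greedy(new_arr, result)
-- ===== SOURCE B (Python) =====
-- def do_greedy(arr, result):
--     # Iterative: sort once, then keep the working list sorted by inserting each
--     # merged sum at its position (scan from the right), instead of re-sorting
--     # every round. (Note: unlike A, this does not sort `arr` in place.)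
--     xs = sorted(arr)
--     total = 0
--     while len(xs) > 1:
--         s = xs[-2] + xs[-1]
--         total += s
--         rest = xs[:-2]
--         j = len(rest)
--         while j > 0 and rest[j - 1] > s:
--             j -= 1
--         xs = rest[:j] + [s] + rest[j:]
--     return total
-- ===== Notes on version B (the rewrite author's own statement) =====
-- stated objective: alternative
-- what changed: Recursion with a full re-sort at every merge step is replaced by a single initial sort plus an iterative loop that re-inserts each merged sum into the sorted working list by a right-to-left scan.
import Mathlib
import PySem

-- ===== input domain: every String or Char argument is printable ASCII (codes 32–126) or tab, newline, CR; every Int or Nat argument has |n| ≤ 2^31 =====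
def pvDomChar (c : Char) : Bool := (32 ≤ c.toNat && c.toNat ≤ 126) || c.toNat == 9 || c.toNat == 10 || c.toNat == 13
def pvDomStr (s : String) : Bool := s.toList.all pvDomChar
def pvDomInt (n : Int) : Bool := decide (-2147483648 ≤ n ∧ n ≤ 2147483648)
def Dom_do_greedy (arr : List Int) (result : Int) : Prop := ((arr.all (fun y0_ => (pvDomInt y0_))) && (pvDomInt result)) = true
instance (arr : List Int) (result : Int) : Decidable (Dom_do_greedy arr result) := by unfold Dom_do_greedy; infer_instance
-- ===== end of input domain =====

-- B replaces A's recursion-with-re-sort by one initial sort plus an iterative loop that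
-- re-inserts each merged sum into the sorted working list (equivalence is about the return
-- value; A additionally sorts the caller's list in place, B does not).

-- ===== PORT A =====
-- A: if len(arr)==1 return 0; else sort, add the two largest, replace them by their sum, recurse.
-- The recursion runs on fuel = len(arr) (each call shrinks the list by one: a totality guard only);
-- the fuel-0 and length-0 branches return 0 only where Python raises IndexError (outside Pre_).
def pvGoA : Nat → List Int → Int
  | 0, _ => 0
  | n + 1, arr =>
    if arr.length = 1 then 0
    else if arr.length = 0 then 0
    else
      let s := PySem.List.sorted arr (fun x => x) false
      let greedy_sum := PySem.List.pyGetD s ((arr.length : Int) - 1) 0 +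
                        PySem.List.pyGetD s ((arr.length : Int) - 2) 0
      let new_arr := PySem.List.slice s none (some (-2)) ++ [greedy_sum]
      greedy_sum + pvGoA n new_arr

def do_greedy (arr : List Int) (result : Int) : Int := pvGoA arr.length arr

-- ===== PORT B =====
-- inner scan: j = len(rest); while j > 0 and rest[j-1] > s: j -= 1   (rest[j-1] is in range)
def pvInsPos (rest : List Int) (s : Int) : Nat → Nat
  | 0 => 0
  | k + 1 => if s < PySem.List.pyGetD rest (k : Int) 0 then pvInsPos rest s k else k + 1

-- while len(xs) > 1: pop the two largest, accumulate their sum, insert it back at position j;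
-- each round shrinks xs by one, so fuel = len(xs) suffices (a totality guard only).
-- (rest[:j] = take j and rest[j:] = drop j, exact since 0 ≤ j ≤ len(rest))
def pvLoop : Nat → List Int → Int → Int
  | 0, _, total => total
  | n + 1, xs, total =>
    if xs.length ≤ 1 then total
    else
      let s := PySem.List.pyGetD xs (-2) 0 + PySem.List.pyGetD xs (-1) 0
      let rest := PySem.List.slice xs none (some (-2))
      let j := pvInsPos rest s rest.length
      pvLoop n (rest.take j ++ [s] ++ rest.drop j) (total + s)

def do_greedy_alt (arr : List Int) (result : Int) : Int :=
  pvLoop arr.length (PySem.List.sorted arr (fun x => x) false) 0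

-- ===== PRECONDITION & SPEC =====
-- Pre_ excludes only the empty list, on which A raises IndexError (arr[len(arr)-1] on []).
def Pre_do_greedy (arr : List Int) (result : Int) : Prop := arr ≠ []
instance (arr : List Int) (result : Int) : Decidable (Pre_do_greedy arr result) := by
  unfold Pre_do_greedy; infer_instance

def pvWitness_do_greedy : List Int × Int := ([3, 1, 2], 0)

def Spec_do_greedy (arr : List Int) (result : Int) (out : Int) : Prop := out = do_greedy_alt arr result
instance (arr : List Int) (result : Int) (out : Int) : Decidable (Spec_do_greedy arr result out) := by unfold Spec_do_greedy; infer_instance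

-- ===== CLAIM (what is proved, stated in full; the proofs are below) =====
def Claim_equal_do_greedy : Prop := ∀ (arr : List Int) (result : Int), Dom_do_greedy arr result → Pre_do_greedy arr result → Spec_do_greedy arr result (do_greedy arr result)

-- ===== LEMMAS AND PROOFS =====

-- slice helper: xs[:-2] is take (len - 2)
theorem pv_slice_neg2 (xs : List Int) :
    PySem.List.slice xs none (some (-2)) = xs.take (xs.length - 2) := by
  simpa using PySem.List.slice_to_neg_natCast (xs := xs) (k := 2) (by omega)

theorem pvInsPos_le (rest : List Int) (s : Int) : ∀ k, pvInsPos rest s k ≤ k := by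
  intro k
  induction k with
  | zero => simp [pvInsPos]
  | succ k ih => simp only [pvInsPos]; split <;> omega

-- the accumulator of B's loop is additive
theorem pvLoop_add : ∀ (n : Nat) (xs : List Int) (t : Int),
    pvLoop n xs t = t + pvLoop n xs 0 := by
  intro n
  induction n with
  | zero => intro xs t; simp [pvLoop]
  | succ n ih =>
    intro xs t
    rw [pvLoop]; conv_rhs => rw [pvLoop]
    by_cases h1 : xs.length ≤ 1
    · simp [h1]
    · simp only [h1, if_false]
      rw [ih _ (t + _), ih _ (0 + _)]
      ring

-- characterisation of the insertion position found by B's right-to-left scan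
theorem pvInsPos_spec (rest : List Int) (s : Int) : ∀ (k : Nat), k ≤ rest.length →
    (∀ i, pvInsPos rest s k ≤ i → i < k → s < rest.getD i 0) ∧
    (pvInsPos rest s k = 0 ∨ rest.getD (pvInsPos rest s k - 1) 0 ≤ s) := by
  intro k
  induction k with
  | zero => intro _; exact ⟨by omega, Or.inl rfl⟩
  | succ k ih =>
    intro hk
    have hk' : k ≤ rest.length := by omega
    rw [pvInsPos]
    by_cases hc : s < PySem.List.pyGetD rest (k : Int) 0
    · have hgd : PySem.List.pyGetD rest (k : Int) 0 = rest.getD k 0 := by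
        simp [PySem.List.pyGetD_natCast]
      obtain ⟨ih1, ih2⟩ := ih hk'
      refine ⟨?_, ?_⟩
      · simp only [hc, if_true]
        intro i hji hik
        by_cases hik' : i < k
        · exact ih1 i hji hik'
        · have : i = k := by omega
          rw [this]; rw [hgd] at hc; exact hc
      · simp only [hc, if_true]; exact ih2
    · refine ⟨?_, ?_⟩
      · simp only [hc, if_false]; omega
      · simp only [hc, if_false]
        right
        have hgd : PySem.List.pyGetD rest (k : Int) 0 = rest.getD k 0 := by
          simp [PySem.List.pyGetD_natCast]
        rw [hgd] at hc
        simpa using not_lt.mp hc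

-- inserting s at the scanned position of a sorted list yields exactly sorted(rest ++ [s])
theorem pv_ins_eq_sorted (rest : List Int) (s : Int)
    (hp : rest.Pairwise (· ≤ ·)) :
    rest.take (pvInsPos rest s rest.length) ++ [s] ++ rest.drop (pvInsPos rest s rest.length)
      = PySem.List.sorted (rest ++ [s]) (fun x => x) false := by
  set j := pvInsPos rest s rest.length with hjdef
  have hj : j ≤ rest.length := pvInsPos_le rest s rest.length
  obtain ⟨hgt, hle⟩ := pvInsPos_spec rest s rest.length le_rfl
  -- elements before j are ≤ s, elements from j on are > s
  have hbefore : ∀ i (hi : i < j), rest[i]'(by omega) ≤ s := by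
    intro i hi
    rcases hle with h0 | hj1
    · omega
    · have hij : i ≤ j - 1 := by omega
      have hj1lt : j - 1 < rest.length := by omega
      have : rest[i]'(by omega) ≤ rest[j-1]'(hj1lt) := by
        rcases Nat.lt_or_ge i (j-1) with h | h
        · exact List.pairwise_iff_getElem.mp hp i (j-1) (by omega) hj1lt h
        · have : i = j - 1 := by omega
          simp [this]
      calc rest[i]'(by omega) ≤ rest[j-1]'(hj1lt) := this
        _ = rest.getD (j-1) 0 := by rw [List.getD_eq_getElem rest 0 hj1lt]
        _ ≤ s := hj1
  have hafter : ∀ i (hi : j ≤ i) (hi2 : i < rest.length), s < rest[i]'(hi2) := by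
    intro i hi hi2
    have := hgt i hi hi2
    rwa [List.getD_eq_getElem rest 0 hi2] at this
  -- the result is sorted
  have hpair : (rest.take j ++ [s] ++ rest.drop j).Pairwise (· ≤ ·) := by
    rw [List.pairwise_append]
    refine ⟨?_, hp.sublist (List.drop_sublist j rest), ?_⟩
    · rw [List.pairwise_append]
      refine ⟨hp.sublist (List.take_sublist j rest), by simp, ?_⟩
      intro a ha b hb
      simp only [List.mem_singleton] at hb
      subst hb
      obtain ⟨i, hi, hieq⟩ := List.mem_take_iff_getElem.mp ha
      rw [← hieq]; exact hbefore i (by omega)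
    · intro a ha b hb
      obtain ⟨i, hi, hieq⟩ := List.mem_iff_getElem.mp hb
      simp only [List.getElem_drop, List.length_drop] at hi hieq
      have hbgt : s < b := by
        rw [← hieq]; exact hafter (j + i) (by omega) (by omega)
      rcases List.mem_append.mp ha with ha' | ha'
      · obtain ⟨i', hi', hieq'⟩ := List.mem_take_iff_getElem.mp ha'
        rw [← hieq']
        have := hbefore i' (by omega)
        omega
      · simp only [List.mem_singleton] at ha'
        subst ha'; omega
  -- the result is a permutation of rest ++ [s]
  have hperm : (rest.take j ++ [s] ++ rest.drop j).Perm (rest ++ [s]) := by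
    have h1 : rest.take j ++ [s] ++ rest.drop j = rest.take j ++ s :: rest.drop j := by
      simp
    rw [h1]
    refine List.perm_middle.trans ?_
    rw [List.take_append_drop]
    exact (List.perm_append_singleton s rest).symm
  exact (PySem.List.sorted_id_eq_of_perm_of_pairwise (xs := rest ++ [s])
    (ys := rest.take j ++ [s] ++ rest.drop j) hperm hpair).symm

theorem main_lemma : ∀ n (arr : List Int), arr.length = n → arr ≠ [] →
    pvGoA n arr = pvLoop n (PySem.List.sorted arr (fun x => x) false) 0 := by
  intro n
  induction n with
  | zero =>
    intro arr h hne
    exact absurd (List.length_eq_zero_iff.mp h) hne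
  | succ n ih =>
    intro arr h hne
    rw [pvGoA]; conv_rhs => rw [pvLoop]
    set xs := PySem.List.sorted arr (fun x => x) false with hxs
    have hlen : xs.length = arr.length := PySem.List.length_sorted arr (fun x => x) false
    by_cases h1 : arr.length = 1
    · simp [h1, hlen]
    · have h0 : arr.length ≠ 0 := fun hz => hne (List.length_eq_zero_iff.mp hz)
      have h2 : 2 ≤ arr.length := by omega
      simp only [h1, if_false, h0, if_false, pv_slice_neg2, hlen,
        show ¬ arr.length ≤ 1 by omega, if_false]
      set rest := xs.take (arr.length - 2) with hrest
      -- A's two top elements equal B's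
      have hA1 : PySem.List.pyGetD xs ((arr.length : Int) - 1) 0
          = xs[arr.length - 1]'(by omega) := by
        have e : ((arr.length : Int) - 1) = ((arr.length - 1 : Nat) : Int) := by omega
        rw [e, PySem.List.pyGetD_natCast, List.getD_eq_getElem xs 0 (by omega)]
      have hA2 : PySem.List.pyGetD xs ((arr.length : Int) - 2) 0
          = xs[arr.length - 2]'(by omega) := by
        have e : ((arr.length : Int) - 2) = ((arr.length - 2 : Nat) : Int) := by omega
        rw [e, PySem.List.pyGetD_natCast, List.getD_eq_getElem xs 0 (by omega)]
      have hB1 : PySem.List.pyGetD xs (-1) 0 = xs[arr.length - 1]'(by omega) := by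
        rw [PySem.List.pyGetD_neg_ofNat xs 1 0 (by omega) (by omega)]
        simp [hlen]
      have hB2 : PySem.List.pyGetD xs (-2) 0 = xs[arr.length - 2]'(by omega) := by
        rw [PySem.List.pyGetD_neg_ofNat xs 2 0 (by omega) (by omega)]
        simp [hlen]
      set g : Int := xs[arr.length - 1]'(by omega) + xs[arr.length - 2]'(by omega) with hg
      set sB : Int := PySem.List.pyGetD xs (-2) 0 + PySem.List.pyGetD xs (-1) 0 with hsB
      have hgs : g = sB := by rw [hsB, hB1, hB2, hg]; ring
      rw [hA1, hA2, ← hg]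
      -- rest of xs is sorted
      have hxp : xs.Pairwise (· ≤ ·) := by
        have := PySem.List.sorted_pairwise (xs := arr) (key := fun x : Int => x) (κ := Int)
        simpa using this
      have hrp : rest.Pairwise (· ≤ ·) := hxp.sublist (List.take_sublist _ _)
      have hrlen : rest.length = arr.length - 2 := by
        simp only [hrest, List.length_take, hlen]; omega
      -- IH on the merged list
      have hnext : (rest ++ [g]).length = n := by
        simp only [List.length_append, List.length_singleton, hrlen]; omega
      have hnn : rest ++ [g] ≠ [] := by simp
      rw [ih (rest ++ [g]) hnext hnn]
      -- B's inserted list is sorted(rest ++ [sB])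
      have hins := pv_ins_eq_sorted rest sB hrp
      rw [hgs, hins]
      -- align the accumulators
      rw [pvLoop_add n _ (0 + sB)]
      ring

-- ===== VERDICT (by name: the statement is the Claim_ definition above) =====
theorem do_greedy_spec : Claim_equal_do_greedy := by
  intro arr result _ hpre
  unfold Spec_do_greedy do_greedy_alt do_greedy
  exact main_lemma arr.length arr rfl hpre
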